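-- pv_equiv track=rewrite | github.com/SerjB45/algorithm_ya_contest | sorting_by_template.py | sorted_by_template
-- ===== SOURCE A (Python) =====
-- def sorted_by_template(n_lst, lst, n_sort, template):
--     tmp_sort_lst = []
--     for n in template:
--         offset = 0
--         for i in range(len(lst)):
--             if n == lst[i - offset]:
--                 tmp_sort_lst.append(n)
--                 del lst[i - offset]
--                 offset += 1
--     lst = tmp_sort_lst + sorted(lst)
--     return lst
-- ===== SOURCE B (Python) =====
-- def sorted_by_template(n_lst, lst, n_sort, template):
--     counts = {}
--     for x in lst:
--         counts[x] = counts.get(x, 0) + 1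
--     out = []
--     for n in template:
--         out += [n] * counts.pop(n, 0)
--     rest = []
--     for k, c in counts.items():
--         rest += [k] * c
--     rest.sort()
--     return out + rest
-- ===== Notes on version B (the rewrite author's own statement) =====
-- stated objective: faster
-- what changed: A repeatedly rescans and deletes from the list for each template value (quadratic passes); B builds a count dictionary once, emits each template value's run by popping its count, and sorts only the untouched remainder.
import Mathlib
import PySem

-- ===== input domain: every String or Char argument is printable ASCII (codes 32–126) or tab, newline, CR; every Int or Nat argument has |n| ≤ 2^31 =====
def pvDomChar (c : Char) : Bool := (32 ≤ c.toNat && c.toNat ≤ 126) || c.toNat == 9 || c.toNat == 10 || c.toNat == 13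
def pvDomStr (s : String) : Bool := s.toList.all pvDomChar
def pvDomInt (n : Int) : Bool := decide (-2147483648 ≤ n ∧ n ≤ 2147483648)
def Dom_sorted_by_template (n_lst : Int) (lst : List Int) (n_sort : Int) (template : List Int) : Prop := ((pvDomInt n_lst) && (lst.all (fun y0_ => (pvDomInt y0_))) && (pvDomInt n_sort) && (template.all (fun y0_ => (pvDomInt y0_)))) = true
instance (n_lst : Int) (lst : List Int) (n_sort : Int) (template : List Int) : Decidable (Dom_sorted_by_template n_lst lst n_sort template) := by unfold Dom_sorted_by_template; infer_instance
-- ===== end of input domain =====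

-- B replaces A's per-template-value rescan-with-deletions by one count dictionary built in a single pass;
-- equivalence is about the RETURN value only: Python A removes template elements from its `lst` argument
-- in place, B does not mutate it.

-- ===== PORT A =====
-- inner loop body: `if n == lst[i - offset]: tmp_sort_lst.append(n); del lst[i - offset]; offset += 1`
-- (the read `lst[i - offset]` and the `del` are ported together by PySem.List.pop?, which is exactly
-- read-then-delete at a Python index; the `none` branch is dead — the index is always in range here)
def pvInnerA (n : Int) (t : List Int × List Int × Int) (i : Nat) : List Int × List Int × Int :=
  match PySem.List.pop? t.2.1 ((i : Int) - t.2.2) with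
  | some (v, rest) => if n == v then (t.1 ++ [n], rest, t.2.2 + 1) else t
  | none => t

-- outer loop body: `offset = 0; for i in range(len(lst)): …`
def pvOuterA (s : List Int × List Int) (n : Int) : List Int × List Int :=
  let r := (List.range s.2.length).foldl (pvInnerA n) (s.1, s.2, 0)
  (r.1, r.2.1)

def sorted_by_template (n_lst : Int) (lst : List Int) (n_sort : Int) (template : List Int) : List Int :=
  let res := template.foldl pvOuterA ([], lst)
  res.1 ++ PySem.List.sorted res.2 (fun x => x) false

-- ===== PORT B =====
-- `out += [n] * counts.pop(n, 0)` (default 0: a missing key contributes nothing and leaves the dict alone)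
def pvStepB (s : List Int × PySem.Dict Int Int) (n : Int) : List Int × PySem.Dict Int Int :=
  match PySem.Dict.pop? s.2 n with
  | some (c, d') => (s.1 ++ PySem.List.pyRepeat [n] c, d')
  | none => s

def sorted_by_template_alt (n_lst : Int) (lst : List Int) (n_sort : Int) (template : List Int) : List Int :=
  let counts := lst.foldl (fun d x => d.modify x 0 (· + 1)) PySem.Dict.empty
  let st := template.foldl pvStepB ([], counts)
  let rest := st.2.items.foldl (fun acc p => acc ++ PySem.List.pyRepeat [p.1] p.2) []
  st.1 ++ PySem.List.sorted rest (fun x => x) false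

-- ===== PRECONDITION & SPEC =====
def Spec_sorted_by_template (n_lst : Int) (lst : List Int) (n_sort : Int) (template : List Int) (out : List Int) : Prop := out = sorted_by_template_alt n_lst lst n_sort template
instance (n_lst : Int) (lst : List Int) (n_sort : Int) (template : List Int) (out : List Int) : Decidable (Spec_sorted_by_template n_lst lst n_sort template out) := by unfold Spec_sorted_by_template; infer_instance

-- ===== CLAIM (what is proved, stated in full; the proofs are below) =====
def Claim_equal_sorted_by_template : Prop := ∀ (n_lst : Int) (lst : List Int) (n_sort : Int) (template : List Int), Dom_sorted_by_template n_lst lst n_sort template → Spec_sorted_by_template n_lst lst n_sort template (sorted_by_template n_lst lst n_sort template)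

-- ===== LEMMAS AND PROOFS =====

-- the content both outer loops compute, per template value: its occurrences (emitted) and the remaining list
def pvSpec : List Int → List Int → List Int × List Int
  | [], cur => ([], cur)
  | n :: ts, cur =>
      let p := pvSpec ts (cur.filter (fun x => !(n == x)))
      (List.replicate (cur.count n) n ++ p.1, p.2)

-- A's inner loop, scanning `rest` behind an already-kept prefix `kept` (loop counter starts at i,
-- offset = i - |kept|): it appends every occurrence of n and deletes them from the list
lemma pvInnerA_spec (n : Int) : ∀ (rest kept tmp : List Int) (i : Nat),
    (List.range' i rest.length).foldl (pvInnerA n) (tmp, kept ++ rest, (i : Int) - kept.length)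
      = (tmp ++ List.replicate (rest.count n) n,
         kept ++ rest.filter (fun x => !(n == x)),
         ((i : Int) - kept.length) + rest.count n) := by
  intro rest
  induction rest with
  | nil => intro kept tmp i; simp
  | cons r rs ih =>
    intro kept tmp i
    rw [List.length_cons, List.range'_succ, List.foldl_cons]
    have hidx : (i : Int) - ((i : Int) - (kept.length : Int)) = ((kept.length : Nat) : Int) := by omega
    have hpop : PySem.List.pop? (kept ++ r :: rs) ((kept.length : Nat) : Int)
        = some (r, kept ++ rs) := by
      rw [PySem.List.pop?_natCast (h := by simp)]
      simp [List.eraseIdx_append_of_length_le (le_refl kept.length)]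
    by_cases h : n = r
    · have hstep : pvInnerA n (tmp, kept ++ r :: rs, (i : Int) - kept.length) i
          = (tmp ++ [n], kept ++ rs, ((i : Int) - kept.length) + 1) := by
        simp [pvInnerA, hidx, hpop, h]
      rw [hstep]
      have hih := ih kept (tmp ++ [n]) (i + 1)
      have harg : ((i + 1 : Nat) : Int) - (kept.length : Int) = ((i : Int) - kept.length) + 1 := by
        push_cast; omega
      rw [harg] at hih
      rw [hih]
      subst h
      refine Prod.ext ?_ (Prod.ext ?_ ?_) <;> simp [List.replicate_succ]
      · omega
    · have hstep : pvInnerA n (tmp, kept ++ r :: rs, (i : Int) - kept.length) i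
          = (tmp, (kept ++ [r]) ++ rs, ((i + 1 : Nat) : Int) - ((kept ++ [r]).length : Int)) := by
        simp [pvInnerA, hidx, hpop, h]
      rw [hstep, ih (kept ++ [r]) tmp (i + 1)]
      refine Prod.ext ?_ (Prod.ext ?_ ?_) <;> simp [h, Ne.symm h]

lemma pvOuterA_step (acc cur : List Int) (n : Int) :
    pvOuterA (acc, cur) n
      = (acc ++ List.replicate (cur.count n) n, cur.filter (fun x => !(n == x))) := by
  show (let r := (List.range cur.length).foldl (pvInnerA n) (acc, cur, 0); (r.1, r.2.1)) = _
  rw [List.range_eq_range']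
  have h := pvInnerA_spec n cur [] acc 0
  simp only [List.nil_append, List.length_nil, Nat.cast_zero, Int.sub_zero] at h
  norm_num at h
  rw [h]

lemma pvOuterA_spec : ∀ (ts : List Int) (acc cur : List Int),
    ts.foldl pvOuterA (acc, cur) = (acc ++ (pvSpec ts cur).1, (pvSpec ts cur).2) := by
  intro ts
  induction ts with
  | nil => intro acc cur; simp [pvSpec]
  | cons n t ih =>
    intro acc cur
    rw [List.foldl_cons, pvOuterA_step, ih]
    simp [pvSpec]

-- set(xs) commutes with filtering
lemma pv_add_filter (p : Int → Bool) (s : List Int) (x : Int) :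
    (PySem.Set.add s x).filter p = if p x then PySem.Set.add (s.filter p) x else s.filter p := by
  simp only [PySem.Set.add]
  by_cases hx : x ∈ s
  · by_cases hp : p x = true
    · simp [hx, hp, List.mem_filter]
    · simp [hx, hp]
  · by_cases hp : p x = true
    · simp [hx, hp, List.mem_filter, List.filter_append]
    · simp [hx, hp, List.filter_append]

lemma pv_foldl_add_filter (p : Int → Bool) : ∀ (xs s : List Int),
    (xs.filter p).foldl PySem.Set.add (s.filter p) = (xs.foldl PySem.Set.add s).filter p := by
  intro xs
  induction xs with
  | nil => intro s; simp
  | cons x t ih =>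
    intro s
    by_cases hp : p x = true
    · simp only [List.filter_cons, hp, if_pos, List.foldl_cons]
      rw [← ih (PySem.Set.add s x), pv_add_filter, if_pos hp]
    · have hfc : (x :: t).filter p = t.filter p := by simp [hp]
      rw [hfc, List.foldl_cons, ← ih (PySem.Set.add s x), pv_add_filter, if_neg hp]

lemma pv_ofList_filter (p : Int → Bool) (xs : List Int) :
    PySem.Set.ofList (xs.filter p) = (PySem.Set.ofList xs).filter p := by
  simpa [PySem.Set.ofList, PySem.Set.empty] using pv_foldl_add_filter p xs []

-- Counter(cur)[n] is some(count) on members, absent otherwise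
lemma pv_get?_counter (cur : List Int) (n : Int) :
    (PySem.Dict.counter cur).get? n = if n ∈ cur then some ((cur.count n : Int)) else none := by
  by_cases h : n ∈ cur
  · have hc : (PySem.Dict.counter cur).contains n = true := by
      rw [PySem.Dict.contains_counter]; simp [h]
    rw [PySem.Dict.contains_eq_isSome_get?] at hc
    obtain ⟨v, hv⟩ := Option.isSome_iff_exists.mp hc
    have hd := PySem.Dict.getD_counter cur n
    rw [PySem.Dict.getD_eq_get?_getD, hv] at hd
    simp only [Option.getD_some] at hd
    simp [h, hv, hd]
  · have hn : (PySem.Dict.counter cur).get? n = none := by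
      rw [PySem.Dict.get?_eq_none_iff_contains, PySem.Dict.contains_counter]; simp [h]
    simp [h, hn]

-- popping a key from a counter = counting the filtered list
lemma pv_counter_erase (cur : List Int) (n : Int) :
    (PySem.Dict.counter cur).erase n = PySem.Dict.counter (cur.filter (fun x => !(n == x))) := by
  apply PySem.Dict.ext
  show List.filter (fun p => !(p.1 == n)) (PySem.Dict.counter cur).items = _
  rw [PySem.Dict.items_counter, PySem.Dict.items_counter, pv_ofList_filter]
  rw [List.filter_map]
  have hpred : ((fun p : Int × Int => !(p.1 == n)) ∘ (fun k => (k, ((cur.count k : Nat) : Int))))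
      = fun k => !(n == k) := by
    funext k; simp [Function.comp, eq_comm]
  rw [hpred]
  apply List.map_congr_left
  intro k hk
  have hkn : ¬ (n = k) := by
    have := (List.mem_filter.mp hk).2; simpa using this
  congr 1
  simp [List.count_filter, hkn]

lemma pvStepB_step (acc : List Int) (cur : List Int) (n : Int) :
    pvStepB (acc, PySem.Dict.counter cur) n
      = (acc ++ List.replicate (cur.count n) n,
         PySem.Dict.counter (cur.filter (fun x => !(n == x)))) := by
  unfold pvStepB
  by_cases h : n ∈ cur
  · simp only [PySem.Dict.pop?, pv_get?_counter, h, if_pos, Option.map_some]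
    rw [pv_counter_erase]
    simp [PySem.List.pyRepeat_singleton]
  · have hf : cur.filter (fun x => !(n == x)) = cur :=
      List.filter_eq_self.mpr (fun x hx => by
        simp; rintro rfl; exact h hx)
    have hc : cur.count n = 0 := by
      rw [List.count_eq_zero]; exact h
    simp [PySem.Dict.pop?, pv_get?_counter, h, hf, hc]

lemma pvStepB_spec : ∀ (ts : List Int) (acc cur : List Int),
    ts.foldl pvStepB (acc, PySem.Dict.counter cur)
      = (acc ++ (pvSpec ts cur).1, PySem.Dict.counter (pvSpec ts cur).2) := by
  intro ts
  induction ts with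
  | nil => intro acc cur; simp [pvSpec]
  | cons n t ih =>
    intro acc cur
    rw [List.foldl_cons, pvStepB_step, ih]
    simp [pvSpec]

lemma pv_count_flatMap (f : Int → Nat) (a : Int) : ∀ (s : List Int), s.Nodup →
    (s.flatMap (fun k => List.replicate (f k) k)).count a = if a ∈ s then f a else 0 := by
  intro s
  induction s with
  | nil => simp
  | cons k t ih =>
    intro hnd
    rw [List.flatMap_cons, List.count_append, ih hnd.of_cons]
    by_cases h : a = k
    · subst h
      have : a ∉ t := (List.nodup_cons.mp hnd).1
      simp [this]
    · simp [h, List.count_replicate, Ne.symm h]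

-- expanding Counter(xs) back into a list is a permutation of xs
lemma pvExpand_perm (xs : List Int) :
    ((PySem.Dict.counter xs).items.flatMap (fun p => PySem.List.pyRepeat [p.1] p.2)).Perm xs := by
  rw [PySem.Dict.items_counter, List.flatMap_map]
  simp only [PySem.List.pyRepeat_singleton, Int.toNat_natCast]
  rw [List.perm_iff_count]
  intro a
  rw [pv_count_flatMap _ a _ (PySem.Set.nodup_ofList xs)]
  by_cases h : a ∈ xs
  · simp [PySem.Set.mem_ofList, h]
  · simp [PySem.Set.mem_ofList, h, List.count_eq_zero.mpr h]

-- ===== VERDICT (by name: the statement is the Claim_ definition above) =====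
theorem sorted_by_template_spec : Claim_equal_sorted_by_template := by
  intro n_lst lst n_sort template _
  simp only [Spec_sorted_by_template, sorted_by_template, sorted_by_template_alt]
  rw [show lst.foldl (fun d x => d.modify x 0 (· + 1)) PySem.Dict.empty = PySem.Dict.counter lst from rfl]
  rw [pvOuterA_spec, pvStepB_spec]
  simp only [List.nil_append]
  rw [PySem.List.foldl_append_eq_flatMap]
  congr 1
  exact ((PySem.List.sorted_id_eq_sorted_id_iff_perm _ _).mpr
    (by simpa using pvExpand_perm (pvSpec template lst).2)).symm
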